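-- pv_equiv track=rewrite | github.com/mcd005/algoPrac | XOR_of_segments_equal_zero.py | xor_except_self
-- ===== SOURCE A (Python) =====
-- def xor_except_self(segment):
--     k = len(segment)
--     values_needed = [0] * k
--     left, right = 0, 0
--     for l in range(k):
--         values_needed[l] = left
--         left ^= segment[l]
--     for r in range(k - 1, -1, -1):
--         values_needed[r] ^= right
--         right ^= segment[r]
--
--     return values_needed
-- ===== SOURCE B (Python) =====
-- def xor_except_self(segment):
--     total = 0
--     for x in segment:
--         total ^= x
--     return [total ^ x for x in segment]
-- ===== Notes on version B (the rewrite author's own statement) =====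
-- stated objective: simpler
-- what changed: Replaces the two prefix/suffix accumulator passes writing into a preallocated array with one total-XOR pass plus an elementwise map using the XOR self-inverse identity (all-but-one = total ^ element).
import Mathlib
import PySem

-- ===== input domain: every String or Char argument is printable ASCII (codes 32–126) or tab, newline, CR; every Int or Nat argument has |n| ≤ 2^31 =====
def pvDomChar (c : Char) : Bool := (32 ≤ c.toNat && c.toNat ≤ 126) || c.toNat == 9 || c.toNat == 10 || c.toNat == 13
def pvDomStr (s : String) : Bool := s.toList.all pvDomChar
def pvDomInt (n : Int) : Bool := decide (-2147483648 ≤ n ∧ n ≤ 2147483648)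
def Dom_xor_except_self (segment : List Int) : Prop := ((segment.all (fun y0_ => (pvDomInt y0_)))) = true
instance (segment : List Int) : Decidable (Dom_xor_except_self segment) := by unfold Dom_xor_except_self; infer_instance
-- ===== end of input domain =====

-- B replaces A's two prefix/suffix accumulator passes with one total-XOR pass plus an
-- elementwise map (XOR self-inverse identity); same O(n) cost, simpler structure.

-- ===== PORT A =====
-- Literal port of A: [0]*k buffer, forward pass writing the running left XOR,
-- backward pass (range(k-1,-1,-1)) XOR-ing in the running right XOR.
-- All indices are in range, so the total forms pySetD/pyGetD are exact here.
def xor_except_self (segment : List Int) : List Int :=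
  let k : Int := segment.length
  let vn0 : List Int := List.replicate k.toNat 0
  let s1 := (PySem.List.pyRange 0 k 1).foldl
      (fun (st : List Int × Int) l =>
        (PySem.List.pySetD st.1 l st.2,
         PySem.Int.bxor st.2 (PySem.List.pyGetD segment l 0)))
      (vn0, 0)
  let s2 := (PySem.List.pyRange (k - 1) (-1) (-1)).foldl
      (fun (st : List Int × Int) r =>
        (PySem.List.pySetD st.1 r (PySem.Int.bxor (PySem.List.pyGetD st.1 r 0) st.2),
         PySem.Int.bxor st.2 (PySem.List.pyGetD segment r 0)))
      (s1.1, 0)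
  s2.1

-- ===== PORT B =====
def xor_except_self_alt (segment : List Int) : List Int :=
  let total := segment.foldl PySem.Int.bxor 0
  segment.map (fun x => PySem.Int.bxor total x)

-- ===== PRECONDITION & SPEC =====
def Spec_xor_except_self (segment : List Int) (out : List Int) : Prop := out = xor_except_self_alt segment
instance (segment : List Int) (out : List Int) : Decidable (Spec_xor_except_self segment out) := by unfold Spec_xor_except_self; infer_instance

-- ===== CLAIM (what is proved, stated in full; the proofs are below) =====
def Claim_equal_xor_except_self : Prop := ∀ (segment : List Int), Dom_xor_except_self segment → Spec_xor_except_self segment (xor_except_self segment)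

-- ===== LEMMAS AND PROOFS =====

-- encoding of Python's infinite-two's-complement ints: sign bit + magnitude bits
def pvEnc (a : Int) : Bool × Nat :=
  (decide (a < 0), if a < 0 then (-a - 1).toNat else a.toNat)

theorem pvEnc_inj {a b : Int} (h : pvEnc a = pvEnc b) : a = b := by
  unfold pvEnc at h
  by_cases ha : a < 0 <;> by_cases hb : b < 0 <;> simp [ha, hb] at h <;> omega

theorem pvEnc_bxor (a b : Int) :
    pvEnc (PySem.Int.bxor a b) = (xor (pvEnc a).1 (pvEnc b).1, (pvEnc a).2 ^^^ (pvEnc b).2) := by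
  unfold pvEnc PySem.Int.bxor
  by_cases ha : a < 0 <;> by_cases hb : b < 0 <;>
    simp [ha, hb, show (0 ≤ a) = ¬ (a < 0) by simp [not_lt], show (0 ≤ b) = ¬ (b < 0) by simp [not_lt]] <;>
    constructor <;> omega

theorem bxor_assoc (a b c : Int) :
    PySem.Int.bxor (PySem.Int.bxor a b) c = PySem.Int.bxor a (PySem.Int.bxor b c) := by
  apply pvEnc_inj
  simp [pvEnc_bxor, Nat.xor_assoc]

-- getD over set, off and on the written index
theorem pvGetD_set_ne (xs : List Int) (a i : Nat) (v : Int) (h : a ≠ i) :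
    (xs.set a v).getD i 0 = xs.getD i 0 := by
  simp [List.getD, List.getElem?_set_ne h]

theorem pvGetD_set_self (xs : List Int) (a : Nat) (v : Int) (h : a < xs.length) :
    (xs.set a v).getD a 0 = v := by
  simp [List.getD, h]

-- running left accumulator: XOR of segment[0:i] in A's accumulation order
def pvPXor (seg : List Int) (i : Nat) : Int := (seg.take i).foldl PySem.Int.bxor 0
-- running right accumulator: XOR of segment[i:] in A's (right-to-left) accumulation order
def pvSXor (seg : List Int) (i : Nat) : Int := ((seg.drop i).reverse).foldl PySem.Int.bxor 0

theorem pvPXor_succ (seg : List Int) (a : Nat) (ha : a < seg.length) :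
    pvPXor seg (a + 1) = PySem.Int.bxor (pvPXor seg a) (seg.getD a 0) := by
  unfold pvPXor
  have h : seg.take (a + 1) = seg.take a ++ [seg.getD a 0] := by
    rw [List.getD_eq_getElem seg 0 ha, List.take_add_one, List.getElem?_eq_getElem ha]
    rfl
  rw [h, List.foldl_append]
  rfl

theorem pvSXor_pred (seg : List Int) (b : Nat) (hb : b < seg.length) :
    pvSXor seg b = PySem.Int.bxor (pvSXor seg (b + 1)) (seg.getD b 0) := by
  unfold pvSXor
  have hd : seg.drop b = seg.getD b 0 :: seg.drop (b + 1) := by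
    rw [List.getD_eq_getElem seg 0 hb]; exact List.drop_eq_getElem_cons hb
  rw [hd, List.reverse_cons, List.foldl_append]
  rfl

theorem pvRange_empty (a : Int) : PySem.List.pyRange a a 1 = [] := by
  simp

theorem pvRange_neg_cons (b : Nat) :
    PySem.List.pyRange (b : Int) (-1) (-1) = (b : Int) :: PySem.List.pyRange ((b : Int) - 1) (-1) (-1) := by
  unfold PySem.List.pyRange
  have e0 : ¬ ((-1 : Int) = 0) := by norm_num
  have e1 : ¬ ((0 : Int) < -1) := by norm_num
  have harith : ∀ x : Int, (x - -1 + -(-1) - 1) / -(-1) = x + 1 := by intro x; norm_num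
  simp only [if_neg e0, if_neg e1, harith]
  rcases Nat.eq_zero_or_pos b with hb | hb
  · subst hb
    have c1 : ((-1 : Int) < (0 : Nat)) := by norm_num
    have c2 : ¬ ((-1 : Int) < ((0 : Nat) : Int) - 1) := by norm_num
    simp only [if_pos c1, if_neg c2]
    norm_num
  · have c1 : ((-1 : Int) < (b : Int)) := by omega
    have c2 : ((-1 : Int) < (b : Int) - 1) := by omega
    simp only [if_pos c1, if_pos c2]
    have h1 : (((b : Int)) + 1).toNat = b + 1 := by omega
    have h2 : (((b : Int) - 1) + 1).toNat = b := by omega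
    rw [h1, h2, List.range_succ_eq_map, List.map_cons, List.map_map]
    rw [List.cons.injEq]; refine ⟨by omega, ?_⟩
    apply List.map_congr_left; intro k _; simp; omega

theorem pvRange_neg_nil : PySem.List.pyRange (-1) (-1) (-1) = [] := by
  unfold PySem.List.pyRange; norm_num

-- identity padding: a list equals the range-map of its own getD
theorem pvSelf_map (vn : List Int) :
    vn = (List.range vn.length).map (fun i => vn.getD i 0) := by
  apply List.ext_getElem
  · simp
  · intro i h1 h2
    simp only [List.getElem_map, List.getElem_range]
    rw [List.getD_eq_getElem vn 0 h1]

-- first loop of A: writes the running prefix XOR at each index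
theorem pvLoop1 (seg : List Int) (a : Nat) (vn : List Int)
    (hlen : vn.length = seg.length) (ha : a ≤ seg.length) :
    (PySem.List.pyRange (a : Int) (seg.length : Int) 1).foldl
      (fun (st : List Int × Int) l =>
        (PySem.List.pySetD st.1 l st.2,
         PySem.Int.bxor st.2 (PySem.List.pyGetD seg l 0)))
      (vn, pvPXor seg a)
    = ((List.range seg.length).map
        (fun i => if i < a then vn.getD i 0 else pvPXor seg i),
       pvPXor seg seg.length) := by
  induction' hlt : seg.length - a with n ih generalizing a vn
  · have haa : a = seg.length := by omega
    rw [haa, pvRange_empty]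
    simp only [List.foldl_nil]
    rw [Prod.mk.injEq]; constructor
    · conv_lhs => rw [pvSelf_map vn]
      rw [hlen]
      apply List.map_congr_left; intro i hi
      simp only [List.mem_range] at hi
      rw [if_pos (by omega)]
    · simp
  · have halt : a < seg.length := by omega
    rw [PySem.List.pyRange_one_cons (by exact_mod_cast halt)]
    simp only [List.foldl_cons]
    rw [PySem.List.pySetD_natCast, PySem.List.pyGetD_natCast]
    rw [show ((a : Int) + 1 = ((a + 1 : Nat) : Int)) by push_cast; ring]
    rw [← pvPXor_succ seg a halt]
    rw [ih (a + 1) (vn.set a (pvPXor seg a)) (by simp [hlen]) (by omega) (by omega)]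
    rw [Prod.mk.injEq]; constructor
    · apply List.map_congr_left; intro i hi
      simp only [List.mem_range] at hi
      by_cases h1 : i < a
      · rw [if_pos (by omega : i < a + 1), if_pos h1, pvGetD_set_ne _ _ _ _ (by omega)]
      · by_cases h2 : i = a
        · subst h2
          rw [if_pos (by omega : i < i + 1), if_neg h1, pvGetD_set_self _ _ _ (by omega)]
        · rw [if_neg (by omega : ¬ i < a + 1), if_neg h1]
    · rfl

-- second loop of A: XORs the running suffix XOR into each cell, right to left
theorem pvLoop2 (seg : List Int) (b : Nat) (vn : List Int)
    (hlen : vn.length = seg.length) (hb : b ≤ seg.length) :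
    (PySem.List.pyRange ((b : Int) - 1) (-1) (-1)).foldl
      (fun (st : List Int × Int) r =>
        (PySem.List.pySetD st.1 r (PySem.Int.bxor (PySem.List.pyGetD st.1 r 0) st.2),
         PySem.Int.bxor st.2 (PySem.List.pyGetD seg r 0)))
      (vn, pvSXor seg b)
    = ((List.range seg.length).map
        (fun i => if i < b then PySem.Int.bxor (vn.getD i 0) (pvSXor seg (i + 1)) else vn.getD i 0),
       pvSXor seg 0) := by
  induction' b with n ih generalizing vn
  · rw [show ((0 : Nat) : Int) - 1 = -1 by norm_num, pvRange_neg_nil]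
    simp only [List.foldl_nil]
    rw [Prod.mk.injEq]; constructor
    · conv_lhs => rw [pvSelf_map vn]
      rw [hlen]
      apply List.map_congr_left; intro i hi
      rw [if_neg (by omega)]
    · rfl
  · rw [show ((n + 1 : Nat) : Int) - 1 = (n : Int) by push_cast; ring, pvRange_neg_cons n]
    simp only [List.foldl_cons]
    rw [PySem.List.pySetD_natCast, PySem.List.pyGetD_natCast, PySem.List.pyGetD_natCast]
    rw [← pvSXor_pred seg n (by omega)]
    rw [ih (vn.set n (PySem.Int.bxor (vn.getD n 0) (pvSXor seg (n + 1)))) (by simp [hlen]) (by omega)]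
    rw [Prod.mk.injEq]; constructor
    · apply List.map_congr_left; intro i hi
      simp only [List.mem_range] at hi
      by_cases h1 : i < n
      · rw [if_pos h1, if_pos (by omega : i < n + 1), pvGetD_set_ne _ _ _ _ (by omega)]
      · by_cases h2 : i = n
        · subst h2
          rw [if_neg h1, if_pos (by omega : i < i + 1), pvGetD_set_self _ _ _ (by omega)]
        · rw [if_neg h1, if_neg (by omega : ¬ i < n + 1), pvGetD_set_ne _ _ _ _ (by omega)]
    · rfl

-- total XOR splits around position i
theorem pvTotal_split (seg : List Int) (i : Nat) (hi : i < seg.length) :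
    pvPXor seg seg.length
      = PySem.Int.bxor (PySem.Int.bxor (pvPXor seg i) (seg.getD i 0)) (pvSXor seg (i + 1)) := by
  induction' hlt : seg.length - (i + 1) with n ih generalizing i
  · have h : i + 1 = seg.length := by omega
    rw [← h, pvPXor_succ seg i hi]
    unfold pvSXor
    rw [h]
    simp [PySem.Int.bxor_zero]
  · have h1 : i + 1 < seg.length := by omega
    rw [ih (i + 1) h1 (by omega), pvPXor_succ seg i hi, pvSXor_pred seg (i + 1) h1]
    rw [bxor_assoc]
    rw [PySem.Int.bxor_comm (seg.getD (i + 1) 0) (pvSXor seg (i + 1 + 1))]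

-- ===== VERDICT (by name: the statement is the Claim_ definition above) =====
theorem xor_except_self_spec : Claim_equal_xor_except_self := by
  intro seg _
  unfold Spec_xor_except_self xor_except_self xor_except_self_alt
  have h0 : pvPXor seg 0 = 0 := rfl
  have hs : pvSXor seg seg.length = 0 := by unfold pvSXor; simp
  have h1 := pvLoop1 seg 0 (List.replicate ((seg.length : Int)).toNat 0)
      (by simp) (by omega)
  rw [Nat.cast_zero, h0] at h1
  have h2 := pvLoop2 seg seg.length
      ((List.range seg.length).map (fun i => if i < 0 then (List.replicate ((seg.length : Int)).toNat (0:Int)).getD i 0 else pvPXor seg i))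
      (by simp) (le_refl _)
  rw [hs] at h2
  simp only [h1, h2]
  have htot : seg.foldl PySem.Int.bxor 0 = pvPXor seg seg.length := by
    unfold pvPXor; rw [List.take_length]
  rw [htot]
  apply List.ext_getElem
  · simp
  · intro i hlen1 hlen2
    simp only [List.length_map, List.length_range] at hlen1 hlen2
    simp only [List.getElem_map, List.getElem_range]
    rw [if_pos (by omega : i < seg.length)]
    rw [PySem.List.getD_map_range _ seg.length i 0 (by omega)]
    rw [if_neg (by omega : ¬ i < 0)]
    have key : PySem.Int.bxor (pvPXor seg i) (pvSXor seg (i + 1))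
        = PySem.Int.bxor (pvPXor seg seg.length) (seg.getD i 0) := by
      rw [pvTotal_split seg i (by omega)]
      rw [bxor_assoc, PySem.Int.bxor_comm (pvSXor seg (i + 1)) (seg.getD i 0), ← bxor_assoc,
          bxor_assoc (pvPXor seg i) (seg.getD i 0) (seg.getD i 0)]
      simp [PySem.Int.bxor_self, PySem.Int.bxor_zero]
    rw [List.getD_eq_getElem seg 0 (by omega)] at key
    exact key
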